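-- pv_equiv track=rewrite | github.com/AbramovAV/information_security | lab_2/prime_test_lucas.py | compute_fibonacci_table
-- ===== SOURCE A (Python) =====
-- from typing import List, Tuple
--
-- def compute_fibonacci_table(upper_boundary:int, modulo=None) -> List[Tuple[int, int]]:
--     fibonacci_table = [(1,1)]
--     for r in range(upper_boundary):
--         fk,fk1 = fibonacci_table[-1]
--         fk, fk1 = (
--                         (fk * (2 * fk1 - fk)),
--                         (fk1 ** 2 + fk ** 2)
--                   )
--         if modulo:
--             fk %= modulo
--             fk1 %= modulo
--         fibonacci_table.append((fk, fk1))
--     return fibonacci_table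
-- ===== SOURCE B (Python) =====
-- def compute_fibonacci_table(upper_boundary, modulo=None):
--     # 2x2 symmetric Fibonacci matrix M^(2^r) = [[a, b], [b, c]]; repeated squaring.
--     table = [(1, 1)]
--     a, b, c = 1, 1, 0  # M^1 = [[F2, F1], [F1, F0]]
--     for _ in range(upper_boundary):
--         a, b, c = a * a + b * b, a * b + b * c, b * b + c * c
--         if modulo:
--             a %= modulo
--             b %= modulo
--             c %= modulo
--         table.append((b, a))
--     return table
-- ===== Notes on version B (the rewrite author's own statement) =====
-- stated objective: alternative
-- what changed: Replaces the fast-doubling pair recurrence with repeated squaring of the symmetric 2x2 Fibonacci matrix [[a,b],[b,c]], reducing all three maintained entries mod modulo and reading each table pair off the matrix cells.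
import Mathlib
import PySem

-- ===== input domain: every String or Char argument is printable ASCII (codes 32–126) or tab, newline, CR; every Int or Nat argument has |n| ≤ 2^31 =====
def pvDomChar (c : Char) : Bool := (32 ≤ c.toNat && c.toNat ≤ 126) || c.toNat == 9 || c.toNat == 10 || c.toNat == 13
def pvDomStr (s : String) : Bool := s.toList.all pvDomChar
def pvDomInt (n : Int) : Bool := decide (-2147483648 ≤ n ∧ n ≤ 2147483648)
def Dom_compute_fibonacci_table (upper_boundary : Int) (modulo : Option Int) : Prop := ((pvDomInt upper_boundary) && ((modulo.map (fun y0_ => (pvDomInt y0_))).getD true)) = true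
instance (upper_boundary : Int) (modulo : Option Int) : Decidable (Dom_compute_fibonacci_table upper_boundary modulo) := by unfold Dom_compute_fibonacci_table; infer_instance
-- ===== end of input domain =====

-- B replaces A's fast-doubling pair recurrence with repeated squaring of the symmetric
-- 2x2 Fibonacci matrix (objective: alternative algorithm of the same cost).

-- ===== PORT A =====
def pvStepA (modulo : Option Int) (fibonacci_table : List (Int × Int)) : List (Int × Int) :=
  let last := (PySem.List.pyGet? fibonacci_table (-1)).getD (0, 0)
  let fk := last.1 * (2 * last.2 - last.1)
  let fk1 := last.2 ^ 2 + last.1 ^ 2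
  match modulo with
  | some m =>
      if m = 0 then fibonacci_table ++ [(fk, fk1)]
      else fibonacci_table ++ [(PySem.Int.mod fk m, PySem.Int.mod fk1 m)]
  | none => fibonacci_table ++ [(fk, fk1)]


def compute_fibonacci_table (upper_boundary : Int) (modulo : Option Int) : List (Int × Int) :=
  (PySem.List.pyRange 0 upper_boundary 1).foldl (fun t _r => pvStepA modulo t) [(1, 1)]

-- ===== PORT B =====
-- one loop iteration of B: square the matrix ((a,b),(b,c)), reduce if truthy, append (b, a)
def pvStepB (modulo : Option Int) (st : (Int × Int × Int) × List (Int × Int)) :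
    (Int × Int × Int) × List (Int × Int) :=
  let a := st.1.1
  let b := st.1.2.1
  let c := st.1.2.2
  let a' := a * a + b * b
  let b' := a * b + b * c
  let c' := b * b + c * c
  match modulo with
  | some m =>
      if m = 0 then ((a', b', c'), st.2 ++ [(b', a')])
      else ((PySem.Int.mod a' m, PySem.Int.mod b' m, PySem.Int.mod c' m),
            st.2 ++ [(PySem.Int.mod b' m, PySem.Int.mod a' m)])
  | none => ((a', b', c'), st.2 ++ [(b', a')])


def compute_fibonacci_table_alt (upper_boundary : Int) (modulo : Option Int) : List (Int × Int) :=
  ((PySem.List.pyRange 0 upper_boundary 1).foldl (fun st _r => pvStepB modulo st)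
    ((1, 1, 0), [(1, 1)])).2

-- ===== PRECONDITION & SPEC =====
def Spec_compute_fibonacci_table (upper_boundary : Int) (modulo : Option Int) (out : List (Int × Int)) : Prop := out = compute_fibonacci_table_alt upper_boundary modulo
instance (upper_boundary : Int) (modulo : Option Int) (out : List (Int × Int)) : Decidable (Spec_compute_fibonacci_table upper_boundary modulo out) := by unfold Spec_compute_fibonacci_table; infer_instance

-- ===== CLAIM (what is proved, stated in full; the proofs are below) =====
def Claim_equal_compute_fibonacci_table : Prop := ∀ (upper_boundary : Int) (modulo : Option Int), Dom_compute_fibonacci_table upper_boundary modulo → Spec_compute_fibonacci_table upper_boundary modulo (compute_fibonacci_table upper_boundary modulo)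

-- ===== LEMMAS AND PROOFS =====

-- invariant tying B's matrix (a,b,c) to A's last pair (b, a): c ≡ a - b under the active reduction
def pvInv (modulo : Option Int) (a b c : Int) : Prop :=
  match modulo with
  | some m => if m = 0 then c = a - b else m ∣ (a - b - c)
  | none => c = a - b


-- Python `%` is constant on residue classes of a nonzero divisor
theorem pv_dvd_sub_mod (m x : Int) : m ∣ (x - PySem.Int.mod x m) := by
  have h := PySem.Int.floordiv_mul_add_mod x m
  exact ⟨PySem.Int.floordiv x m, by linarith [h]⟩

theorem pv_mod_congr (m x y : Int) (hm : m ≠ 0) (h : m ∣ (x - y)) :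
    PySem.Int.mod x m = PySem.Int.mod y m := by
  have hx := pv_dvd_sub_mod m x
  have hy := pv_dvd_sub_mod m y
  have hd : m ∣ (PySem.Int.mod x m - PySem.Int.mod y m) := by
    have e : PySem.Int.mod x m - PySem.Int.mod y m
        = (x - y) - (x - PySem.Int.mod x m) + (y - PySem.Int.mod y m) := by ring
    rw [e]
    exact dvd_add (dvd_sub h hx) hy
  rcases lt_trichotomy m 0 with hneg | hz | hpos
  · have b1 := PySem.Int.mod_neg_bounds (a := x) hneg
    have b2 := PySem.Int.mod_neg_bounds (a := y) hneg
    have hd' : (-m) ∣ (PySem.Int.mod x m - PySem.Int.mod y m) := (neg_dvd).mpr hd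
    have := Int.eq_zero_of_abs_lt_dvd hd' (by rw [abs_lt]; constructor <;> omega)
    omega
  · omega
  · have b1 := PySem.Int.mod_nonneg (a := x) hpos
    have b2 := PySem.Int.mod_nonneg (a := y) hpos
    have b3 := PySem.Int.mod_lt (a := x) hpos
    have b4 := PySem.Int.mod_lt (a := y) hpos
    have := Int.eq_zero_of_abs_lt_dvd hd (by rw [abs_lt]; constructor <;> omega)
    omega

theorem pv_pyGet_last (t : List (Int × Int)) (x : Int × Int) :
    PySem.List.pyGet? (t ++ [x]) (-1) = some x := by
  simp [PySem.List.pyGet?, PySem.List.pyIdx?]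

theorem pv_loop (l : List Int) (modulo : Option Int) :
    ∀ (table : List (Int × Int)) (a b c : Int),
      pvInv modulo a b c →
      PySem.List.pyGet? table (-1) = some (b, a) →
      l.foldl (fun t _r => pvStepA modulo t) table
        = (l.foldl (fun st _r => pvStepB modulo st) ((a, b, c), table)).2 := by
  induction l with
  | nil => intro table a b c _ _; simp
  | cons hd tl ih =>
    intro table a b c hinv hlast
    simp only [List.foldl_cons]
    cases modulo with
    | none =>
      have hc : c = a - b := hinv
      have eA : pvStepA none table = table ++ [(b * (2 * a - b), a ^ 2 + b ^ 2)] := by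
        simp [pvStepA, hlast]
      have eB : pvStepB none ((a, b, c), table)
          = ((a * a + b * b, a * b + b * c, b * b + c * c),
             table ++ [(a * b + b * c, a * a + b * b)]) := by
        simp [pvStepB]
      rw [eA, eB]
      have h1 : b * (2 * a - b) = a * b + b * c := by rw [hc]; ring
      have h2 : a ^ 2 + b ^ 2 = a * a + b * b := by ring
      rw [h1, h2]
      apply ih
      · show b * b + c * c = (a * a + b * b) - (a * b + b * c)
        rw [hc]; ring
      · exact pv_pyGet_last _ _
    | some m =>
      by_cases hm : m = 0
      · subst hm
        have hc : c = a - b := by simpa [pvInv] using hinv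
        have eA : pvStepA (some 0) table = table ++ [(b * (2 * a - b), a ^ 2 + b ^ 2)] := by
          simp [pvStepA, hlast]
        have eB : pvStepB (some 0) ((a, b, c), table)
            = ((a * a + b * b, a * b + b * c, b * b + c * c),
               table ++ [(a * b + b * c, a * a + b * b)]) := by
          simp [pvStepB]
        rw [eA, eB]
        have h1 : b * (2 * a - b) = a * b + b * c := by rw [hc]; ring
        have h2 : a ^ 2 + b ^ 2 = a * a + b * b := by ring
        rw [h1, h2]
        apply ih
        · show (b * b + c * c : Int) = (a * a + b * b) - (a * b + b * c)
          rw [hc]; ring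
        · exact pv_pyGet_last _ _
      · have hdvd : m ∣ (a - b - c) := by simpa [pvInv, hm] using hinv
        have eA : pvStepA (some m) table
            = table ++ [(PySem.Int.mod (b * (2 * a - b)) m, PySem.Int.mod (a ^ 2 + b ^ 2) m)] := by
          simp [pvStepA, hlast, hm]
        have eB : pvStepB (some m) ((a, b, c), table)
            = ((PySem.Int.mod (a * a + b * b) m, PySem.Int.mod (a * b + b * c) m,
                PySem.Int.mod (b * b + c * c) m),
               table ++ [(PySem.Int.mod (a * b + b * c) m, PySem.Int.mod (a * a + b * b) m)]) := by
          simp [pvStepB, hm]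
        rw [eA, eB]
        have h1 : PySem.Int.mod (b * (2 * a - b)) m = PySem.Int.mod (a * b + b * c) m := by
          apply pv_mod_congr m _ _ hm
          have e : b * (2 * a - b) - (a * b + b * c) = b * (a - b - c) := by ring
          rw [e]; exact Dvd.dvd.mul_left hdvd b
        have h2 : PySem.Int.mod (a ^ 2 + b ^ 2) m = PySem.Int.mod (a * a + b * b) m := by
          apply pv_mod_congr m _ _ hm
          have e : a ^ 2 + b ^ 2 - (a * a + b * b) = 0 := by ring
          rw [e]; exact dvd_zero m
        rw [h1, h2]
        apply ih
        · simp only [pvInv, if_neg hm]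
          have hA := pv_dvd_sub_mod m (a * a + b * b)
          have hB := pv_dvd_sub_mod m (a * b + b * c)
          have hC := pv_dvd_sub_mod m (b * b + c * c)
          have hS : m ∣ ((a * a + b * b) - (a * b + b * c) - (b * b + c * c)) := by
            have e : (a * a + b * b) - (a * b + b * c) - (b * b + c * c)
                = (a + c) * (a - b - c) := by ring
            rw [e]; exact Dvd.dvd.mul_left hdvd (a + c)
          have e : PySem.Int.mod (a * a + b * b) m - PySem.Int.mod (a * b + b * c) m
              - PySem.Int.mod (b * b + c * c) m
              = (((a * a + b * b) - (a * b + b * c) - (b * b + c * c))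
                 - ((a * a + b * b) - PySem.Int.mod (a * a + b * b) m))
                + ((a * b + b * c) - PySem.Int.mod (a * b + b * c) m)
                + ((b * b + c * c) - PySem.Int.mod (b * b + c * c) m) := by ring
          rw [e]
          exact dvd_add (dvd_add (dvd_sub hS hA) hB) hC
        · exact pv_pyGet_last _ _

-- ===== VERDICT (by name: the statement is the Claim_ definition above) =====
theorem compute_fibonacci_table_spec : Claim_equal_compute_fibonacci_table := by
  intro ub modulo _hdom
  unfold Spec_compute_fibonacci_table compute_fibonacci_table compute_fibonacci_table_alt
  apply pv_loop
  · cases modulo with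
    | none => simp [pvInv]
    | some m => by_cases hm : m = 0 <;> simp [pvInv, hm]
  · decide
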